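-- pv_equiv track=rewrite | github.com/ishangote/Coding-Interviews-Python | Leetcode/84 Largest Rectangle in Histogram/largest_rectangle_histogram.py | monotonic_stack_helper
-- ===== SOURCE A (Python) =====
-- def monotonic_stack_helper(heights, direction):
--     res = [len(heights)] * len(heights) if direction == "NEXT" else [-1] * len(heights)
--     stack = []
--     (lo, hi, skip) = (
--         (0, len(heights), 1) if direction == "NEXT" else (len(heights) - 1, -1, -1)
--     )
--
--     for idx in range(lo, hi, skip):
--         while stack and heights[idx] < heights[stack[-1]]:
--             update_idx = stack.pop()
--             res[update_idx] = idx
--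
--         stack.append(idx)
--
--     return res
-- ===== SOURCE B (Python) =====
-- def monotonic_stack_helper(heights, direction):
--     n = len(heights)
--     if direction == "NEXT":
--         res = [n] * n
--         for i in range(n - 1, -1, -1):
--             j = i + 1
--             while j < n and heights[j] >= heights[i]:
--                 j = res[j]
--             res[i] = j
--         return res
--     res = [-1] * n
--     for i in range(n):
--         j = i - 1
--         while j >= 0 and heights[j] >= heights[i]:
--             j = res[j]
--         res[i] = j
--     return res
-- ===== Notes on version B (the rewrite author's own statement) =====
-- stated objective: alternative
-- what changed: Replaced the explicit monotonic stack (one shared pop loop driven by direction sentinels) with the jump-pointer method: the result array itself serves as skip links, and each index finds its nearest strictly smaller neighbour by following previously computed answers; no auxiliary stack.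
import Mathlib
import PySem

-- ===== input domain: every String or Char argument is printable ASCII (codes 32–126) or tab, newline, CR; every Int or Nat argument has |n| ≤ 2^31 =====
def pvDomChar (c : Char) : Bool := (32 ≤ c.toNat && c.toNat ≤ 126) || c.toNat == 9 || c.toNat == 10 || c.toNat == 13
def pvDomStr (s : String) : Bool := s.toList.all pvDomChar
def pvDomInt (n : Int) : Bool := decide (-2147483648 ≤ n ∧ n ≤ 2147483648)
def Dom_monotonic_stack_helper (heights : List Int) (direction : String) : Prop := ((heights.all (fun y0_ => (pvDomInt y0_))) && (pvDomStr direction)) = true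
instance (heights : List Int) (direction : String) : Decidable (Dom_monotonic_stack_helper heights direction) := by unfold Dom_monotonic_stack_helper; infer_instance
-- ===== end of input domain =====

-- B replaces A's explicit monotonic stack with the jump-pointer method: the result array
-- itself serves as skip links toward the nearest strictly smaller neighbour; no auxiliary stack.

-- ===== PORT A =====
-- inner 'while stack and heights[idx] < heights[stack[-1]]' loop; stack head = Python stack[-1].
-- heights[idx] / heights[top] and res[update_idx] = idx are in range whenever A runs them,
-- so pyGetD / pySetD are exact here.
def mshPop (heights : List Int) (idx : Int) : List Int → List Int → List Int × List Int
  | res, [] => (res, [])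
  | res, top :: rest =>
    if PySem.List.pyGetD heights idx 0 < PySem.List.pyGetD heights top 0 then
      mshPop heights idx (PySem.List.pySetD res top idx) rest
    else (res, top :: rest)

def monotonic_stack_helper (heights : List Int) (direction : String) : List Int :=
  let n : Int := heights.length
  let res0 : List Int :=
    if direction == "NEXT" then List.replicate heights.length n
    else List.replicate heights.length (-1)
  let lhs : Int × Int × Int := if direction == "NEXT" then (0, n, 1) else (n - 1, -1, -1)
  ((PySem.List.pyRange lhs.1 lhs.2.1 lhs.2.2).foldl
      (fun st idx =>
        let p := mshPop heights idx st.1 st.2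
        (p.1, idx :: p.2))
      (res0, [])).1

-- ===== PORT B =====
-- 'j = i + 1; while j < n and heights[j] >= heights[i]: j = res[j]'.
-- The fuel parameter only makes the while loop total: on every execution B performs the
-- loop visits strictly increasing (resp. decreasing) indices, so heights.length + 1 fuel
-- is never exhausted (established by the lemmas below); indices read are in range, so
-- pyGetD / pySetD are exact.
def mshJumpUp (heights res : List Int) (cur : Int) : Nat → Int → Int
  | 0, j => j
  | fuel+1, j =>
    if j < (heights.length : Int) ∧ cur ≤ PySem.List.pyGetD heights j 0 then
      mshJumpUp heights res cur fuel (PySem.List.pyGetD res j 0)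
    else j

-- 'j = i - 1; while j >= 0 and heights[j] >= heights[i]: j = res[j]'
def mshJumpDown (heights res : List Int) (cur : Int) : Nat → Int → Int
  | 0, j => j
  | fuel+1, j =>
    if 0 ≤ j ∧ cur ≤ PySem.List.pyGetD heights j 0 then
      mshJumpDown heights res cur fuel (PySem.List.pyGetD res j 0)
    else j

def monotonic_stack_helper_alt (heights : List Int) (direction : String) : List Int :=
  if direction == "NEXT" then
    (PySem.List.pyRange ((heights.length : Int) - 1) (-1) (-1)).foldl
      (fun res i =>
        PySem.List.pySetD res i
          (mshJumpUp heights res (PySem.List.pyGetD heights i 0) (heights.length + 1) (i + 1)))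
      (List.replicate heights.length (heights.length : Int))
  else
    (PySem.List.pyRange 0 (heights.length : Int) 1).foldl
      (fun res i =>
        PySem.List.pySetD res i
          (mshJumpDown heights res (PySem.List.pyGetD heights i 0) (heights.length + 1) (i - 1)))
      (List.replicate heights.length (-1))

-- ===== PRECONDITION & SPEC =====
def Spec_monotonic_stack_helper (heights : List Int) (direction : String) (out : List Int) : Prop := out = monotonic_stack_helper_alt heights direction
instance (heights : List Int) (direction : String) (out : List Int) : Decidable (Spec_monotonic_stack_helper heights direction out) := by unfold Spec_monotonic_stack_helper; infer_instance

-- ===== CLAIM (what is proved, stated in full; the proofs are below) =====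
def Claim_equal_monotonic_stack_helper : Prop := ∀ (heights : List Int) (direction : String), Dom_monotonic_stack_helper heights direction → Spec_monotonic_stack_helper heights direction (monotonic_stack_helper heights direction)

-- ===== LEMMAS AND PROOFS =====

-- proof-only reference function: the per-index nearest-strictly-smaller scan, and its
-- packaging mshNearest; A and B are each proved equal to mshNearest.
def mshScanUp (heights : List Int) (cur : Int) (j : Int) : Int :=
  if _h : j < (heights.length : Int) ∧ cur ≤ PySem.List.pyGetD heights j 0 then
    mshScanUp heights cur (j + 1)
  else j
termination_by ((heights.length : Int) - j).toNat
decreasing_by omega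

def mshScanDown (heights : List Int) (cur : Int) (j : Int) : Int :=
  if _h : 0 ≤ j ∧ cur ≤ PySem.List.pyGetD heights j 0 then
    mshScanDown heights cur (j - 1)
  else j
termination_by (j + 1).toNat
decreasing_by omega

def mshNearest (heights : List Int) (direction : String) : List Int :=
  if direction == "NEXT" then
    (List.range heights.length).map
      (fun (i : Nat) => mshScanUp heights (PySem.List.pyGetD heights (i : Int) 0) ((i : Int) + 1))
  else
    (List.range heights.length).map
      (fun (i : Nat) => mshScanDown heights (PySem.List.pyGetD heights (i : Int) 0) ((i : Int) - 1))


-- generic list helpers -------------------------------------------------------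

theorem msh_getD_set (res : List Int) (t : Nat) (v : Int) (i : Nat) (ht : t < res.length) :
    (res.set t v).getD i 0 = if i = t then v else res.getD i 0 := by
  rcases Nat.lt_or_ge i res.length with hi | hi
  · have hi' : i < (res.set t v).length := by simpa using hi
    rw [List.getD_eq_getElem _ _ hi', List.getD_eq_getElem _ _ hi, List.getElem_set]
    split <;> simp_all
    intro h; omega
  · have h1 : (res.set t v).getD i 0 = 0 := List.getD_eq_default _ _ (by simpa using hi)
    have h2 : res.getD i 0 = 0 := List.getD_eq_default _ _ hi
    rw [h1, h2]
    have : i ≠ t := by omega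
    simp [this]

theorem msh_length_foldl_set (l : List Nat) (res : List Int) (v : Int) :
    (l.foldl (fun r t => r.set t v) res).length = res.length := by
  induction l generalizing res with
  | nil => rfl
  | cons a l ih => simpa [List.foldl_cons] using ih (res.set a v)

theorem msh_getD_foldl_set (l : List Nat) (res : List Int) (v : Int) (i : Nat)
    (hl : ∀ t ∈ l, t < res.length) :
    (l.foldl (fun r t => r.set t v) res).getD i 0 = if i ∈ l then v else res.getD i 0 := by
  induction l generalizing res with
  | nil => simp
  | cons a l ih =>
    have ha : a < res.length := hl a (by simp)
    rw [List.foldl_cons, ih (res.set a v) (by intro t htl; simpa using hl t (by simp [htl])),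
      msh_getD_set res a v i ha]
    by_cases h1 : i ∈ l <;> by_cases h2 : i = a <;> simp [h1, h2]

theorem msh_mem_dropWhile_le (h : List Int) (c : Int) (l : List Nat)
    (hp : l.Pairwise (fun a b => h.getD b 0 ≤ h.getD a 0)) (t : Nat)
    (ht : t ∈ l.dropWhile (fun x => decide (c < h.getD x 0))) : h.getD t 0 ≤ c := by
  induction l with
  | nil => simp at ht
  | cons a l ih =>
    rw [List.dropWhile_cons] at ht
    by_cases hc : c < h.getD a 0
    · rw [if_pos (by simpa using hc)] at ht
      exact ih hp.tail ht
    · rw [if_neg (by simpa using hc)] at ht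
      rcases List.mem_cons.mp ht with rfl | htl
      · omega
      · have := (List.pairwise_cons.mp hp).1 t htl
        omega

theorem msh_mem_dropWhile_of_not {α : Type} (p : α → Bool) (l : List α) (t : α)
    (ht : t ∈ l) (hp : p t = false) : t ∈ l.dropWhile p := by
  have := (List.takeWhile_append_dropWhile (p := p) (l := l)) ▸ ht
  rcases List.mem_append.mp this with h1 | h1
  · have := List.mem_takeWhile_imp h1
    simp [hp] at this
  · exact h1

-- the pop loop on a stack of (casts of) natural indices ----------------------

theorem mshPop_eq (h : List Int) (idx : Int) (s : List Nat) : ∀ res : List Int,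
    mshPop h idx res (s.map (Nat.cast : Nat → Int)) =
      ((s.takeWhile (fun t => decide (PySem.List.pyGetD h idx 0 < h.getD t 0))).foldl
          (fun r t => r.set t idx) res,
        (s.dropWhile (fun t => decide (PySem.List.pyGetD h idx 0 < h.getD t 0))).map Nat.cast) := by
  induction s with
  | nil => intro res; simp [mshPop]
  | cons t s ih =>
    intro res
    by_cases hc : PySem.List.pyGetD h idx 0 < h[t]?.getD 0
    · simp [mshPop, PySem.List.pyGetD_natCast, PySem.List.pySetD_natCast,
        List.getD_eq_getElem?_getD, hc, ih]
    · simp [mshPop, PySem.List.pyGetD_natCast, List.getD_eq_getElem?_getD, hc]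

-- NEXT direction: pure recursion mirroring A's fold state --------------------

def mshStackN (h : List Int) : Nat → List Nat
  | 0 => []
  | k+1 => k :: (mshStackN h k).dropWhile (fun t => decide (h.getD k 0 < h.getD t 0))

def mshResN (h : List Int) : Nat → List Int
  | 0 => List.replicate h.length (h.length : Int)
  | k+1 => ((mshStackN h k).takeWhile (fun t => decide (h.getD k 0 < h.getD t 0))).foldl
      (fun r t => r.set t (k : Int)) (mshResN h k)

theorem msh_fold_next (h : List Int) (k : Nat) :
    ((List.range k).foldl (fun st (kk : Nat) =>
        let p := mshPop h (kk : Int) st.1 st.2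
        (p.1, ((kk : Nat) : Int) :: p.2))
      (List.replicate h.length (h.length : Int), ([] : List Int)))
      = (mshResN h k, (mshStackN h k).map (Nat.cast : Nat → Int)) := by
  induction k with
  | zero => simp [mshResN, mshStackN]
  | succ k ih =>
    rw [List.range_succ, List.foldl_append, ih]
    simp only [List.foldl_cons, List.foldl_nil]
    rw [mshPop_eq h (k : Int) (mshStackN h k) (mshResN h k)]
    simp [mshResN, mshStackN, PySem.List.pyGetD_natCast]

theorem msh_invN (h : List Int) : ∀ k : Nat, k ≤ h.length →
    (mshResN h k).length = h.length ∧
    (∀ t ∈ mshStackN h k, t < k ∧ ∀ j : Nat, t < j → j < k → h.getD t 0 ≤ h.getD j 0) ∧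
    (∀ t : Nat, t < k → (∀ j : Nat, t < j → j < k → h.getD t 0 ≤ h.getD j 0) →
        t ∈ mshStackN h k) ∧
    (mshStackN h k).Pairwise (fun a b => h.getD b 0 ≤ h.getD a 0) ∧
    (∀ i : Nat, i < h.length →
      ((mshResN h k).getD i 0 = (h.length : Int) ∧
        ∀ j : Nat, i < j → j < k → h.getD i 0 ≤ h.getD j 0) ∨
      (∃ m : Nat, (mshResN h k).getD i 0 = (m : Int) ∧ i < m ∧ m < k ∧
        h.getD m 0 < h.getD i 0 ∧ ∀ j : Nat, i < j → j < m → h.getD i 0 ≤ h.getD j 0)) := by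
  intro k
  induction k with
  | zero =>
    intro _
    refine ⟨by simp [mshResN], by simp [mshStackN], by omega, by simp [mshStackN], ?_⟩
    intro i hi
    left
    refine ⟨?_, by omega⟩
    rw [mshResN, List.getD_eq_getElem _ _ (by simpa using hi)]
    simp
  | succ k ih =>
    intro hk1
    obtain ⟨hlen, hsound, hcomp, hpair, hres⟩ := ih (by omega)
    have hkn : k < h.length := by omega
    set c := h.getD k 0 with hc
    set pr : Nat → Bool := fun t => decide (c < h.getD t 0) with hpr
    have hsub_take : ∀ t ∈ (mshStackN h k).takeWhile pr, t ∈ mshStackN h k :=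
      fun t ht => (List.takeWhile_sublist _).subset ht
    have hsub_drop : ∀ t ∈ (mshStackN h k).dropWhile pr, t ∈ mshStackN h k :=
      fun t ht => (List.dropWhile_sublist _).subset ht
    have hPlt : ∀ t ∈ (mshStackN h k).takeWhile pr, t < h.length := by
      intro t ht
      have := (hsound t (hsub_take t ht)).1
      omega
    have hdrop_le : ∀ t ∈ (mshStackN h k).dropWhile pr, h.getD t 0 ≤ c :=
      fun t ht => msh_mem_dropWhile_le h c _ hpair t ht
    have hstep_stack : mshStackN h (k+1) = k :: (mshStackN h k).dropWhile pr := rfl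
    have hstep_res : mshResN h (k+1) =
        ((mshStackN h k).takeWhile pr).foldl (fun r t => r.set t (k : Int)) (mshResN h k) := rfl
    refine ⟨?_, ?_, ?_, ?_, ?_⟩
    · rw [hstep_res, msh_length_foldl_set]
      exact hlen
    · intro t ht
      rw [hstep_stack, List.mem_cons] at ht
      rcases ht with rfl | ht
      · exact ⟨by omega, by omega⟩
      · have h1 := hsound t (hsub_drop t ht)
        refine ⟨by omega, ?_⟩
        intro j htj hjk
        by_cases hj : j < k
        · exact h1.2 j htj hj
        · have : j = k := by omega
          subst this
          exact hdrop_le t ht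
    · intro t ht hcond
      rw [hstep_stack, List.mem_cons]
      by_cases htk : t = k
      · exact Or.inl htk
      · right
        have htk' : t < k := by omega
        have hmem : t ∈ mshStackN h k :=
          hcomp t htk' (fun j h1 h2 => hcond j h1 (by omega))
        have hple : h.getD t 0 ≤ c := hcond k htk' (by omega)
        refine msh_mem_dropWhile_of_not pr _ t hmem ?_
        rw [hpr]
        exact decide_eq_false (by omega)
    · rw [hstep_stack]
      refine List.pairwise_cons.mpr ⟨fun b hb => hdrop_le b hb, ?_⟩
      exact hpair.sublist (List.dropWhile_sublist _)
    · intro i hi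
      rw [hstep_res, msh_getD_foldl_set _ _ _ _ (by rw [hlen]; exact hPlt)]
      by_cases hmem : i ∈ (mshStackN h k).takeWhile pr
      · right
        have h1 := hsound i (hsub_take i hmem)
        have h2 : pr i = true := List.mem_takeWhile_imp hmem
        refine ⟨k, by simp [hmem], h1.1, by omega, ?_, h1.2⟩
        simp [hpr] at h2
        exact h2
      · rw [if_neg hmem]
        rcases hres i hi with ⟨hv, hall⟩ | ⟨m, hv, him, hmk, hm, hall⟩
        · left
          refine ⟨hv, ?_⟩
          intro j hij hjk1
          by_cases hj : j < k
          · exact hall j hij hj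
          · have hjk : j = k := by omega
            rw [hjk, ← hc]
            have hik : i < k := by omega
            have hmemS : i ∈ mshStackN h k := hcomp i hik hall
            have : i ∈ (mshStackN h k).takeWhile pr ++ (mshStackN h k).dropWhile pr := by
              rw [List.takeWhile_append_dropWhile]
              exact hmemS
            rcases List.mem_append.mp this with h1 | h1
            · exact absurd h1 hmem
            · exact hdrop_le i h1
        · exact Or.inr ⟨m, hv, him, by omega, hm, hall⟩

theorem mshScanUp_eq (h : List Int) (c : Int) (m : Nat) (hmn : m ≤ h.length)
    (hstop : m = h.length ∨ h.getD m 0 < c) :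
    ∀ (f j : Nat), m - j = f → j ≤ m →
      (∀ p : Nat, j ≤ p → p < m → c ≤ h.getD p 0) →
      mshScanUp h c (j : Int) = (m : Int) := by
  intro f
  induction f with
  | zero =>
    intro j hf hjm _
    have : j = m := by omega
    subst this
    rw [mshScanUp]
    rw [dif_neg]
    push Not
    intro hlt
    rcases hstop with h1 | h1
    · omega
    · rw [PySem.List.pyGetD_natCast]
      omega
  | succ f ih =>
    intro j hf hjm hall
    have hjm' : j < m := by omega
    rw [mshScanUp, dif_pos]
    · have : ((j : Int) + 1) = ((j + 1 : Nat) : Int) := by push_cast; ring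
      rw [this]
      exact ih (j+1) (by omega) (by omega) (fun p hp1 hp2 => hall p (by omega) hp2)
    · constructor
      · omega
      · rw [PySem.List.pyGetD_natCast]
        exact hall j le_rfl hjm'

theorem msh_A_next (h : List Int) (d : String) (hd : (d == "NEXT") = true) :
    monotonic_stack_helper h d = mshResN h h.length := by
  unfold monotonic_stack_helper
  simp only [hd, if_true]
  rw [PySem.List.pyRange_one]
  have h1 : (((h.length : Int)) - 0).toNat = h.length := by omega
  rw [h1, List.foldl_map]
  simp only [zero_add]
  exact congrArg Prod.fst (msh_fold_next h h.length)

theorem msh_A_nearest_next (h : List Int) (d : String) (hd : (d == "NEXT") = true) :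
    monotonic_stack_helper h d = mshNearest h d := by
  rw [msh_A_next h d hd]
  unfold mshNearest
  rw [if_pos hd]
  obtain ⟨hlen, -, -, -, hres⟩ := msh_invN h h.length le_rfl
  apply List.ext_getElem (by simp [hlen])
  intro i h1 h2
  have hi : i < h.length := by rwa [hlen] at h1
  rw [List.getElem_map, List.getElem_range, ← List.getD_eq_getElem (mshResN h h.length) 0 h1,
    PySem.List.pyGetD_natCast]
  have hcast : ((i : Int) + 1) = ((i + 1 : Nat) : Int) := by push_cast; ring
  rw [hcast]
  rcases hres i hi with ⟨hv, hall⟩ | ⟨m, hv, him, hmn, hm, hall⟩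
  · rw [hv, mshScanUp_eq h (h.getD i 0) h.length le_rfl (Or.inl rfl) (h.length - (i+1)) (i+1)
      rfl (by omega) (fun p hp1 hp2 => hall p (by omega) hp2)]
  · rw [hv, mshScanUp_eq h (h.getD i 0) m (by omega) (Or.inr hm) (m - (i+1)) (i+1)
      rfl (by omega) (fun p hp1 hp2 => hall p (by omega) hp2)]

-- PREV direction (any direction ≠ "NEXT"): mirrored recursion ---------------

def mshStackP (h : List Int) : Nat → List Nat
  | 0 => []
  | k+1 => (h.length - 1 - k) ::
      (mshStackP h k).dropWhile (fun t => decide (h.getD (h.length - 1 - k) 0 < h.getD t 0))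

def mshResP (h : List Int) : Nat → List Int
  | 0 => List.replicate h.length (-1)
  | k+1 => ((mshStackP h k).takeWhile
        (fun t => decide (h.getD (h.length - 1 - k) 0 < h.getD t 0))).foldl
      (fun r t => r.set t ((h.length - 1 - k : Nat) : Int)) (mshResP h k)

theorem msh_fold_prev (h : List Int) : ∀ k : Nat, k ≤ h.length →
    ((List.range k).foldl (fun st (kk : Nat) =>
        let p := mshPop h ((h.length : Int) - 1 - (kk : Int)) st.1 st.2
        (p.1, ((h.length : Int) - 1 - (kk : Int)) :: p.2))
      (List.replicate h.length (-1 : Int), ([] : List Int)))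
      = (mshResP h k, (mshStackP h k).map (Nat.cast : Nat → Int)) := by
  intro k
  induction k with
  | zero => simp [mshResP, mshStackP]
  | succ k ih =>
    intro hk1
    rw [List.range_succ, List.foldl_append, ih (by omega)]
    simp only [List.foldl_cons, List.foldl_nil]
    have hcast : ((h.length : Int) - 1 - (k : Int)) = ((h.length - 1 - k : Nat) : Int) := by
      omega
    rw [hcast, mshPop_eq h _ (mshStackP h k) (mshResP h k)]
    simp [mshResP, mshStackP, PySem.List.pyGetD_natCast]

theorem msh_invP (h : List Int) : ∀ k : Nat, k ≤ h.length →
    (mshResP h k).length = h.length ∧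
    (∀ t ∈ mshStackP h k, h.length - k ≤ t ∧ t < h.length ∧
      ∀ j : Nat, h.length - k ≤ j → j < t → h.getD t 0 ≤ h.getD j 0) ∧
    (∀ t : Nat, h.length - k ≤ t → t < h.length →
      (∀ j : Nat, h.length - k ≤ j → j < t → h.getD t 0 ≤ h.getD j 0) →
        t ∈ mshStackP h k) ∧
    (mshStackP h k).Pairwise (fun a b => h.getD b 0 ≤ h.getD a 0) ∧
    (∀ i : Nat, i < h.length →
      ((mshResP h k).getD i 0 = -1 ∧
        ∀ j : Nat, h.length - k ≤ j → j < i → h.getD i 0 ≤ h.getD j 0) ∨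
      (∃ m : Nat, (mshResP h k).getD i 0 = (m : Int) ∧ h.length - k ≤ m ∧ m < i ∧
        h.getD m 0 < h.getD i 0 ∧ ∀ j : Nat, m < j → j < i → h.getD i 0 ≤ h.getD j 0)) := by
  intro k
  induction k with
  | zero =>
    intro _
    refine ⟨by simp [mshResP], by simp [mshStackP], by omega, by simp [mshStackP], ?_⟩
    intro i hi
    left
    refine ⟨?_, by omega⟩
    rw [mshResP, List.getD_eq_getElem _ _ (by simpa using hi)]
    simp
  | succ k ih =>
    intro hk1
    obtain ⟨hlen, hsound, hcomp, hpair, hres⟩ := ih (by omega)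
    have hkn : k < h.length := by omega
    set cur : Nat := h.length - 1 - k with hcur
    have hcur1 : h.length - (k+1) = cur := by omega
    have hcur2 : cur + 1 = h.length - k := by omega
    set c := h.getD cur 0 with hc
    set pr : Nat → Bool := fun t => decide (c < h.getD t 0) with hpr
    have hsub_take : ∀ t ∈ (mshStackP h k).takeWhile pr, t ∈ mshStackP h k :=
      fun t ht => (List.takeWhile_sublist _).subset ht
    have hsub_drop : ∀ t ∈ (mshStackP h k).dropWhile pr, t ∈ mshStackP h k :=
      fun t ht => (List.dropWhile_sublist _).subset ht
    have hPlt : ∀ t ∈ (mshStackP h k).takeWhile pr, t < h.length := by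
      intro t ht
      exact (hsound t (hsub_take t ht)).2.1
    have hdrop_le : ∀ t ∈ (mshStackP h k).dropWhile pr, h.getD t 0 ≤ c :=
      fun t ht => msh_mem_dropWhile_le h c _ hpair t ht
    have hstep_stack : mshStackP h (k+1) = cur :: (mshStackP h k).dropWhile pr := rfl
    have hstep_res : mshResP h (k+1) =
        ((mshStackP h k).takeWhile pr).foldl (fun r t => r.set t (cur : Int)) (mshResP h k) := rfl
    refine ⟨?_, ?_, ?_, ?_, ?_⟩
    · rw [hstep_res, msh_length_foldl_set]
      exact hlen
    · intro t ht
      rw [hstep_stack, List.mem_cons] at ht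
      rcases ht with rfl | ht
      · exact ⟨by omega, by omega, by omega⟩
      · obtain ⟨h1, h2, h3⟩ := hsound t (hsub_drop t ht)
        refine ⟨by omega, h2, ?_⟩
        intro j hj1 hj2
        by_cases hj : h.length - k ≤ j
        · exact h3 j hj hj2
        · have : j = cur := by omega
          rw [this, ← hc]
          exact hdrop_le t ht
    · intro t ht1 ht2 hcond
      rw [hstep_stack, List.mem_cons]
      by_cases htc : t = cur
      · exact Or.inl htc
      · right
        have htc' : h.length - k ≤ t := by omega
        have hmem : t ∈ mshStackP h k :=
          hcomp t htc' ht2 (fun j h1 h2 => hcond j (by omega) h2)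
        have hple : h.getD t 0 ≤ c := by
          rw [hc]
          exact hcond cur (by omega) (by omega)
        refine msh_mem_dropWhile_of_not pr _ t hmem ?_
        rw [hpr]
        exact decide_eq_false (by omega)
    · rw [hstep_stack]
      refine List.pairwise_cons.mpr ⟨fun b hb => hdrop_le b hb, ?_⟩
      exact hpair.sublist (List.dropWhile_sublist _)
    · intro i hi
      rw [hstep_res, msh_getD_foldl_set _ _ _ _ (by rw [hlen]; exact hPlt)]
      by_cases hmem : i ∈ (mshStackP h k).takeWhile pr
      · right
        obtain ⟨h1, h2, h3⟩ := hsound i (hsub_take i hmem)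
        have h4 : pr i = true := List.mem_takeWhile_imp hmem
        refine ⟨cur, by simp [hmem], by omega, by omega, ?_, ?_⟩
        · simp [hpr] at h4
          rw [← hc]
          exact h4
        · intro j hj1 hj2
          exact h3 j (by omega) hj2
      · rw [if_neg hmem]
        rcases hres i hi with ⟨hv, hall⟩ | ⟨m, hv, hm1, hm2, hm3, hall⟩
        · left
          refine ⟨hv, ?_⟩
          intro j hj1 hj2
          by_cases hj : h.length - k ≤ j
          · exact hall j hj hj2
          · have hjc : j = cur := by omega
            rw [hjc, ← hc]
            have hicur : cur < i := by omega
            have hige : h.length - k ≤ i := by omega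
            have hmemS : i ∈ mshStackP h k := hcomp i hige hi hall
            have : i ∈ (mshStackP h k).takeWhile pr ++ (mshStackP h k).dropWhile pr := by
              rw [List.takeWhile_append_dropWhile]
              exact hmemS
            rcases List.mem_append.mp this with h1 | h1
            · exact absurd h1 hmem
            · exact hdrop_le i h1
        · exact Or.inr ⟨m, hv, by omega, hm2, hm3, hall⟩

theorem mshScanDown_eq (h : List Int) (c : Int) (m : Int) (hm1 : -1 ≤ m)
    (hstop : m = -1 ∨ ∃ mn : Nat, m = (mn : Int) ∧ h.getD mn 0 < c) :
    ∀ (f : Nat) (j : Int), (j - m).toNat = f → m ≤ j →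
      (∀ p : Nat, m < (p : Int) → (p : Int) ≤ j → c ≤ h.getD p 0) →
      mshScanDown h c j = m := by
  intro f
  induction f with
  | zero =>
    intro j hf hjm _
    have : j = m := by omega
    subst this
    rw [mshScanDown, dif_neg]
    push Not
    intro hle
    rcases hstop with h1 | h1
    · omega
    · obtain ⟨mn, rfl, hlt⟩ := h1
      rw [PySem.List.pyGetD_natCast]
      omega
  | succ f ih =>
    intro j hf hjm hall
    have hjm' : m < j := by omega
    have hj0 : 0 ≤ j := by omega
    rw [mshScanDown, dif_pos]
    · exact ih (j - 1) (by omega) (by omega)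
        (fun p hp1 hp2 => hall p hp1 (by omega))
    · refine ⟨hj0, ?_⟩
      have hjt : ((j.toNat : Nat) : Int) = j := Int.toNat_of_nonneg hj0
      rw [← hjt, PySem.List.pyGetD_natCast]
      exact hall j.toNat (by omega) (by omega)

theorem msh_A_prev (h : List Int) (d : String) (hd : (d == "NEXT") = false) :
    monotonic_stack_helper h d = mshResP h h.length := by
  unfold monotonic_stack_helper
  simp only [hd, Bool.false_eq_true, if_false]
  rw [PySem.List.pyRange_neg_one]
  have h1 : (((h.length : Int) - 1) - (-1)).toNat = h.length := by omega
  rw [h1, List.foldl_map]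
  exact congrArg Prod.fst (msh_fold_prev h h.length le_rfl)

theorem msh_A_nearest_prev (h : List Int) (d : String) (hd : (d == "NEXT") = false) :
    monotonic_stack_helper h d = mshNearest h d := by
  rw [msh_A_prev h d hd]
  unfold mshNearest
  rw [if_neg (by simp [hd] : ¬ (d == "NEXT") = true)]
  obtain ⟨hlen, -, -, -, hres⟩ := msh_invP h h.length le_rfl
  apply List.ext_getElem (by simp [hlen])
  intro i h1 h2
  have hi : i < h.length := by rwa [hlen] at h1
  rw [List.getElem_map, List.getElem_range, ← List.getD_eq_getElem (mshResP h h.length) 0 h1,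
    PySem.List.pyGetD_natCast]
  rcases hres i hi with ⟨hv, hall⟩ | ⟨m, hv, hm1, hm2, hm3, hall⟩
  · rw [hv, mshScanDown_eq h (h.getD i 0) (-1) le_rfl (Or.inl rfl) ((i : Int) - 1 - (-1)).toNat
      ((i : Int) - 1) rfl (by omega) ?_]
    intro p hp1 hp2
    exact hall p (by omega) (by omega)
  · rw [hv, mshScanDown_eq h (h.getD i 0) (m : Int) (by omega) (Or.inr ⟨m, rfl, hm3⟩)
      ((i : Int) - 1 - (m : Int)).toNat ((i : Int) - 1) rfl (by omega) ?_]
    intro p hp1 hp2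
    exact hall p (by omega) (by omega)



-- B side: the jump loop also lands on the nearest strictly smaller index ------

theorem mshScanUp_char (h : List Int) (c : Int) : ∀ (f j : Nat), h.length - j = f →
    j ≤ h.length →
    ∃ M : Nat, mshScanUp h c (j : Int) = (M : Int) ∧ j ≤ M ∧ M ≤ h.length ∧
      (∀ p : Nat, j ≤ p → p < M → c ≤ h.getD p 0) ∧
      (M = h.length ∨ h.getD M 0 < c) := by
  intro f
  induction f with
  | zero =>
    intro j hf hj
    have hjn : j = h.length := by omega
    refine ⟨j, ?_, le_rfl, by omega, by omega, Or.inl hjn⟩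
    rw [mshScanUp, dif_neg]
    push Not
    intro hlt
    omega
  | succ f ih =>
    intro j hf hj
    have hjn : j < h.length := by omega
    by_cases hc : c ≤ h.getD j 0
    · obtain ⟨M, hMeq, hM1, hM2, hM3, hM4⟩ := ih (j+1) (by omega) (by omega)
      refine ⟨M, ?_, by omega, hM2, ?_, hM4⟩
      · rw [mshScanUp, dif_pos ⟨by omega, by rw [PySem.List.pyGetD_natCast]; exact hc⟩]
        have : ((j : Int) + 1) = ((j + 1 : Nat) : Int) := by omega
        rw [this]
        exact hMeq
      · intro p hp1 hp2
        by_cases hpj : p = j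
        · rwa [hpj]
        · exact hM3 p (by omega) hp2
    · refine ⟨j, ?_, le_rfl, by omega, by omega, Or.inr (by omega)⟩
      rw [mshScanUp, dif_neg]
      push Not
      intro _
      rw [PySem.List.pyGetD_natCast]
      omega

theorem mshScanDown_char (h : List Int) (c : Int) : ∀ (f : Nat) (j : Int),
    (j + 1).toNat ≤ f → -1 ≤ j →
    ∃ M : Int, mshScanDown h c j = M ∧ -1 ≤ M ∧ M ≤ j ∧
      (∀ p : Nat, M < (p : Int) → (p : Int) ≤ j → c ≤ h.getD p 0) ∧
      (M = -1 ∨ ∃ mn : Nat, M = (mn : Int) ∧ h.getD mn 0 < c) := by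
  intro f
  induction f with
  | zero =>
    intro j hf hj
    have hjn : j = -1 := by omega
    refine ⟨j, ?_, hj, le_rfl, by intro p hp1 hp2; omega, Or.inl hjn⟩
    rw [mshScanDown, dif_neg]
    push Not
    intro h0
    omega
  | succ f ih =>
    intro j hf hj
    by_cases hjn : j = -1
    · refine ⟨j, ?_, hj, le_rfl, by intro p hp1 hp2; omega, Or.inl hjn⟩
      rw [mshScanDown, dif_neg]
      push Not
      intro h0
      omega
    · have hj0 : 0 ≤ j := by omega
      have hjt : ((j.toNat : Nat) : Int) = j := Int.toNat_of_nonneg hj0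
      by_cases hc : c ≤ h.getD j.toNat 0
      · obtain ⟨M, hMeq, hM1, hM2, hM3, hM4⟩ := ih (j - 1) (by omega) (by omega)
        refine ⟨M, ?_, hM1, by omega, ?_, hM4⟩
        · rw [mshScanDown, dif_pos ⟨hj0, by rw [← hjt, PySem.List.pyGetD_natCast]; exact hc⟩]
          exact hMeq
        · intro p hp1 hp2
          by_cases hpj : (p : Int) = j
          · have : p = j.toNat := by omega
            rwa [this]
          · exact hM3 p hp1 (by omega)
      · refine ⟨j, ?_, hj, le_rfl, by intro p hp1 hp2; omega,
          Or.inr ⟨j.toNat, hjt.symm, by omega⟩⟩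
        rw [mshScanDown, dif_neg]
        push Not
        intro _
        rw [← hjt, PySem.List.pyGetD_natCast]
        omega

theorem mshJumpUp_eq (h res : List Int) (c : Int) (M : Nat) (hMn : M ≤ h.length)
    (hstop : M = h.length ∨ h.getD M 0 < c) :
    ∀ (fuel j : Nat), h.length + 1 - j ≤ fuel → j ≤ M →
      (∀ p : Nat, j ≤ p → p < M → c ≤ h.getD p 0) →
      (∀ t : Nat, j ≤ t → t < h.length →
        res.getD t 0 = mshScanUp h (h.getD t 0) ((t : Int) + 1)) →
      mshJumpUp h res c fuel (j : Int) = (M : Int) := by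
  intro fuel
  induction fuel with
  | zero =>
    intro j hfuel hjM _ _
    omega
  | succ fuel ih =>
    intro j hfuel hjM hall hres
    by_cases hjeq : j = M
    · subst hjeq
      rw [mshJumpUp]
      rw [if_neg]
      push Not
      intro hlt
      rcases hstop with h1 | h1
      · omega
      · rw [PySem.List.pyGetD_natCast]
        omega
    · have hjM' : j < M := by omega
      rw [mshJumpUp, if_pos ⟨by omega, by
        rw [PySem.List.pyGetD_natCast]; exact hall j le_rfl hjM'⟩]
      have hjn : j < h.length := by omega
      obtain ⟨J, hJeq, hJ1, hJ2, hJ3, hJ4⟩ :=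
        mshScanUp_char h (h.getD j 0) (h.length - (j+1)) (j+1) rfl (by omega)
      have hcast : ((j : Int) + 1) = ((j + 1 : Nat) : Int) := by omega
      have hresj : PySem.List.pyGetD res (j : Int) 0 = (J : Int) := by
        rw [PySem.List.pyGetD_natCast, hres j le_rfl hjn, hcast, hJeq]
      rw [hresj]
      have hJM : J ≤ M := by
        by_contra hJM
        have hMn : M < h.length := by omega
        have h1 : h.getD j 0 ≤ h.getD M 0 := hJ3 M (by omega) (by omega)
        have h2 : h.getD M 0 < c := by
          rcases hstop with h3 | h3
          · omega
          · exact h3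
        have h3 : c ≤ h.getD j 0 := hall j le_rfl hjM'
        omega
      exact ih J (by omega) hJM (fun p hp1 hp2 => hall p (by omega) hp2)
        (fun t ht1 ht2 => hres t (by omega) ht2)

theorem mshJumpDown_eq (h res : List Int) (c : Int) (M : Int) (hM1 : -1 ≤ M)
    (hstop : M = -1 ∨ ∃ mn : Nat, M = (mn : Int) ∧ h.getD mn 0 < c) :
    ∀ (fuel : Nat) (j : Int), (j - M).toNat + 1 ≤ fuel → M ≤ j →
      (∀ p : Nat, M < (p : Int) → (p : Int) ≤ j → c ≤ h.getD p 0) →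
      (∀ t : Nat, (t : Int) ≤ j →
        res.getD t 0 = mshScanDown h (h.getD t 0) ((t : Int) - 1)) →
      mshJumpDown h res c fuel j = M := by
  intro fuel
  induction fuel with
  | zero =>
    intro j hfuel hjM _ _
    omega
  | succ fuel ih =>
    intro j hfuel hjM hall hres
    by_cases hjeq : j = M
    · subst hjeq
      rw [mshJumpDown]
      rw [if_neg]
      push Not
      intro h0
      rcases hstop with h1 | h1
      · omega
      · obtain ⟨mn, rfl, hlt⟩ := h1
        rw [PySem.List.pyGetD_natCast]
        omega
    · have hjM' : M < j := by omega
      have hj0 : 0 ≤ j := by omega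
      have hjt : ((j.toNat : Nat) : Int) = j := Int.toNat_of_nonneg hj0
      have hcj : c ≤ h.getD j.toNat 0 := hall j.toNat (by omega) (by omega)
      rw [mshJumpDown, if_pos ⟨hj0, by rw [← hjt, PySem.List.pyGetD_natCast]; exact hcj⟩]
      obtain ⟨J, hJeq, hJ1, hJ2, hJ3, hJ4⟩ :=
        mshScanDown_char h (h.getD j.toNat 0) j.toNat (j - 1) (by omega) (by omega)
      have hresj : PySem.List.pyGetD res j 0 = J := by
        rw [← hjt, PySem.List.pyGetD_natCast, hres j.toNat (by omega)]
        rw [hjt, hJeq]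
      rw [hresj]
      have hJM : M ≤ J := by
        by_contra hJM
        rcases hstop with h1 | h1
        · omega
        · obtain ⟨mn, rfl, hlt⟩ := h1
          have h2 : h.getD j.toNat 0 ≤ h.getD mn 0 := hJ3 mn (by omega) (by omega)
          omega
      refine ih J ?_ hJM
        (fun p hp1 hp2 => hall p hp1 (by omega))
        (fun t ht1 => hres t (by omega))
      clear ih hres hall hstop hresj hJeq hJ3 hJ4 hcj
      omega

def mshRnext (h : List Int) (k : Nat) : List Int :=
  (List.range k).foldl (fun res (kk : Nat) =>
      PySem.List.pySetD res ((h.length : Int) - 1 - (kk : Int))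
        (mshJumpUp h res (PySem.List.pyGetD h ((h.length : Int) - 1 - (kk : Int)) 0)
          (h.length + 1) (((h.length : Int) - 1 - (kk : Int)) + 1)))
    (List.replicate h.length (h.length : Int))

def mshRprev (h : List Int) (k : Nat) : List Int :=
  (List.range k).foldl (fun res (kk : Nat) =>
      PySem.List.pySetD res (kk : Int)
        (mshJumpDown h res (PySem.List.pyGetD h (kk : Int) 0)
          (h.length + 1) ((kk : Int) - 1)))
    (List.replicate h.length (-1 : Int))

theorem mshRnext_succ (h : List Int) (k : Nat) :
    mshRnext h (k + 1) = PySem.List.pySetD (mshRnext h k) ((h.length : Int) - 1 - (k : Int))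
      (mshJumpUp h (mshRnext h k) (PySem.List.pyGetD h ((h.length : Int) - 1 - (k : Int)) 0)
        (h.length + 1) (((h.length : Int) - 1 - (k : Int)) + 1)) := by
  rw [mshRnext, mshRnext, List.range_succ, List.foldl_append, List.foldl_cons, List.foldl_nil]

theorem mshRprev_succ (h : List Int) (k : Nat) :
    mshRprev h (k + 1) = PySem.List.pySetD (mshRprev h k) (k : Int)
      (mshJumpDown h (mshRprev h k) (PySem.List.pyGetD h (k : Int) 0)
        (h.length + 1) ((k : Int) - 1)) := by
  rw [mshRprev, mshRprev, List.range_succ, List.foldl_append, List.foldl_cons, List.foldl_nil]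

theorem msh_B_inv_next (h : List Int) : ∀ k : Nat, k ≤ h.length →
    (mshRnext h k).length = h.length ∧
    (∀ t : Nat, h.length - k ≤ t → t < h.length →
      (mshRnext h k).getD t 0 = mshScanUp h (h.getD t 0) ((t : Int) + 1)) ∧
    (∀ t : Nat, t < h.length - k → (mshRnext h k).getD t 0 = (h.length : Int)) := by
  intro k
  induction k with
  | zero =>
    intro _
    refine ⟨by simp [mshRnext], by intro t ht1 ht2; omega, ?_⟩
    intro t ht
    rw [mshRnext, List.range_zero, List.foldl_nil, List.getD_eq_getElem _ _ (by simpa using ht)]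
    simp
  | succ k ih =>
    intro hk1
    obtain ⟨hlen, hgood, hinit⟩ := ih (by omega)
    have hkn : k < h.length := by omega
    set cur : Nat := h.length - 1 - k with hcur
    have hcast : ((h.length : Int) - 1 - (k : Int)) = (cur : Int) := by omega
    have hcast2 : ((cur : Int) + 1) = ((cur + 1 : Nat) : Int) := by omega
    obtain ⟨M, hMeq, hM1, hM2, hM3, hM4⟩ :=
      mshScanUp_char h (h.getD cur 0) (h.length - (cur + 1)) (cur + 1) rfl (by omega)
    have hjump : mshJumpUp h (mshRnext h k)
        (PySem.List.pyGetD h ((h.length : Int) - 1 - (k : Int)) 0) (h.length + 1)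
        (((h.length : Int) - 1 - (k : Int)) + 1) = (M : Int) := by
      rw [hcast, PySem.List.pyGetD_natCast, hcast2]
      exact mshJumpUp_eq h _ (h.getD cur 0) M hM2 hM4 (h.length + 1) (cur + 1) (by omega) hM1
        hM3 (fun t ht1 ht2 => hgood t (by omega) ht2)
    have hstep : mshRnext h (k + 1) = (mshRnext h k).set cur (M : Int) := by
      rw [mshRnext_succ, hjump, hcast, PySem.List.pySetD_natCast]
    have hclen : cur < (mshRnext h k).length := by rw [hlen]; omega
    rw [hstep]
    refine ⟨by rw [List.length_set]; exact hlen, ?_, ?_⟩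
    · intro t ht1 ht2
      rw [msh_getD_set _ _ _ _ hclen]
      by_cases htc : t = cur
      · rw [if_pos htc, htc, ← hMeq, hcast2]
      · rw [if_neg htc]
        exact hgood t (by omega) ht2
    · intro t ht
      rw [msh_getD_set _ _ _ _ hclen, if_neg (by omega)]
      exact hinit t (by omega)

theorem msh_B_inv_prev (h : List Int) : ∀ k : Nat, k ≤ h.length →
    (mshRprev h k).length = h.length ∧
    (∀ t : Nat, t < k →
      (mshRprev h k).getD t 0 = mshScanDown h (h.getD t 0) ((t : Int) - 1)) ∧
    (∀ t : Nat, k ≤ t → t < h.length → (mshRprev h k).getD t 0 = (-1 : Int)) := by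
  intro k
  induction k with
  | zero =>
    intro _
    refine ⟨by simp [mshRprev], by intro t ht; omega, ?_⟩
    intro t _ ht
    rw [mshRprev, List.range_zero, List.foldl_nil, List.getD_eq_getElem _ _ (by simpa using ht)]
    simp
  | succ k ih =>
    intro hk1
    obtain ⟨hlen, hgood, hinit⟩ := ih (by omega)
    have hkn : k < h.length := by omega
    obtain ⟨M, hMeq, hM1, hM2, hM3, hM4⟩ :=
      mshScanDown_char h (h.getD k 0) k ((k : Int) - 1) (by omega) (by omega)
    have hjump : mshJumpDown h (mshRprev h k) (PySem.List.pyGetD h (k : Int) 0)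
        (h.length + 1) ((k : Int) - 1) = M := by
      rw [PySem.List.pyGetD_natCast]
      refine mshJumpDown_eq h _ (h.getD k 0) M hM1 hM4 (h.length + 1) ((k : Int) - 1)
        (by omega) hM2 hM3 ?_
      intro t ht1
      exact hgood t (by omega)
    have hstep : mshRprev h (k + 1) = (mshRprev h k).set k M := by
      rw [mshRprev_succ, hjump, PySem.List.pySetD_natCast]
    have hclen : k < (mshRprev h k).length := by rw [hlen]; omega
    rw [hstep]
    refine ⟨by rw [List.length_set]; exact hlen, ?_, ?_⟩
    · intro t ht1
      rw [msh_getD_set _ _ _ _ hclen]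
      by_cases htc : t = k
      · rw [if_pos htc, htc, ← hMeq]
      · rw [if_neg htc]
        exact hgood t (by omega)
    · intro t ht1 ht2
      rw [msh_getD_set _ _ _ _ hclen, if_neg (by omega)]
      exact hinit t (by omega) ht2

theorem msh_B_next (h : List Int) (d : String) (hd : (d == "NEXT") = true) :
    monotonic_stack_helper_alt h d = mshNearest h d := by
  have halt : monotonic_stack_helper_alt h d = mshRnext h h.length := by
    unfold monotonic_stack_helper_alt
    rw [if_pos hd, PySem.List.pyRange_neg_one]
    have h1 : (((h.length : Int) - 1) - (-1)).toNat = h.length := by omega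
    rw [h1, List.foldl_map]
    rfl
  rw [halt]
  unfold mshNearest
  rw [if_pos hd]
  obtain ⟨hlen, hgood, -⟩ := msh_B_inv_next h h.length le_rfl
  apply List.ext_getElem (by simp [hlen])
  intro i hi1 hi2
  have hi : i < h.length := by rwa [hlen] at hi1
  rw [List.getElem_map, List.getElem_range, ← List.getD_eq_getElem _ 0 hi1,
    PySem.List.pyGetD_natCast]
  exact hgood i (by omega) hi

theorem msh_B_prev (h : List Int) (d : String) (hd : (d == "NEXT") = false) :
    monotonic_stack_helper_alt h d = mshNearest h d := by
  have halt : monotonic_stack_helper_alt h d = mshRprev h h.length := by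
    unfold monotonic_stack_helper_alt
    rw [if_neg (by simp [hd] : ¬ (d == "NEXT") = true), PySem.List.pyRange_one]
    have h1 : (((h.length : Int)) - 0).toNat = h.length := by omega
    rw [h1, List.foldl_map]
    simp only [zero_add]
    rfl
  rw [halt]
  unfold mshNearest
  rw [if_neg (by simp [hd] : ¬ (d == "NEXT") = true)]
  obtain ⟨hlen, hgood, -⟩ := msh_B_inv_prev h h.length le_rfl
  apply List.ext_getElem (by simp [hlen])
  intro i hi1 hi2
  have hi : i < h.length := by rwa [hlen] at hi1
  rw [List.getElem_map, List.getElem_range, ← List.getD_eq_getElem _ 0 hi1,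
    PySem.List.pyGetD_natCast]
  exact hgood i hi

-- ===== VERDICT (by name: the statement is the Claim_ definition above) =====
theorem monotonic_stack_helper_spec : Claim_equal_monotonic_stack_helper := by
  intro heights direction _
  unfold Spec_monotonic_stack_helper
  cases hE : direction == "NEXT" with
  | true => exact ((msh_B_next heights direction hE).symm ▸
      msh_A_nearest_next heights direction hE : _)
  | false => exact ((msh_B_prev heights direction hE).symm ▸
      msh_A_nearest_prev heights direction hE : _)
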